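-- pv_equiv track=rewrite | github.com/christofmuc/KnobKraft-orm | adaptations/Korg_microKORG.py | escapeSysex
-- ===== SOURCE A (Python) =====
-- def escapeSysex(data_8bit):
--     # This function converts 8-bit data to 7-bit sysex format.
--     sysex_7bit_data = []
--     i = 0
--     while i < len(data_8bit):
--         chunk = data_8bit[i:i+7]
--         msbs = 0
--         for j, byte in enumerate(chunk):
--             if byte & 0x80:
--                 msbs |= (1 << j)
--
--         sysex_7bit_data.append(msbs)
--         for byte in chunk:
--             sysex_7bit_data.append(byte & 0x7f)
--
--         i += 7
--     return sysex_7bit_data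
-- ===== SOURCE B (Python) =====
-- def escapeSysex(data_8bit):
--     # Single streaming pass: drop a 0 placeholder at each chunk start and
--     # back-patch its MSB bits while emitting the low bytes.
--     output = []
--     msb_pos = 0
--     for i, byte in enumerate(data_8bit):
--         if i % 7 == 0:
--             msb_pos = len(output)
--             output.append(0)
--         output.append(byte & 0x7f)
--         if byte & 0x80:
--             output[msb_pos] |= 1 << (i % 7)
--     return output
-- ===== Notes on version B (the rewrite author's own statement) =====
-- stated objective: simpler
-- what changed: Replaced A's chunk-slicing while loop with two separate inner loops per chunk (MSB collection, then low bytes) by a single streaming pass over enumerate(data) that appends a 0 placeholder at each chunk start and back-patches MSB bits into it via output[msb_pos] |= 1 << (i % 7).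
import Mathlib
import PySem

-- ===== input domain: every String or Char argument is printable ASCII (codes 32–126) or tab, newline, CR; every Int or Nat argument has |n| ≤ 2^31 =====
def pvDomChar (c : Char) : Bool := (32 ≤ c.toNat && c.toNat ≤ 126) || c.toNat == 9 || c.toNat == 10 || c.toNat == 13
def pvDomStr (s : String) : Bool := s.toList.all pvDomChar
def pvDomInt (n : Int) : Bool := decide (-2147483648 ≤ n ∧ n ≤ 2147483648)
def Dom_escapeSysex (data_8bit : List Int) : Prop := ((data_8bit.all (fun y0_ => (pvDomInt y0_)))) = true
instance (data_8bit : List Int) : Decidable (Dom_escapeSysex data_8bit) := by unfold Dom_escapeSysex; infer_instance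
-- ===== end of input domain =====

-- B is simpler: one streaming pass with a back-patched MSB placeholder instead of
-- A's chunk slicing with two separate inner loops per chunk (return value only).

-- ===== PORT A =====
-- inner 'for j, byte in enumerate(chunk): if byte & 0x80: msbs |= 1 << j' loop
def msbsAux (j : Nat) (m : Int) : List Int → Int
  | [] => m
  | byte :: rest =>
      msbsAux (j + 1) (if PySem.Int.band byte 128 ≠ 0 then PySem.Int.bor m ((1 : Int) <<< j) else m) rest

-- the while loop: chunk = data_8bit[i:i+7] (= take 7 of the remaining data), emit
-- msbs then the low bytes, continue at i += 7 (= the remaining data minus 7 elements)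
def goA : List Int → List Int
  | [] => []
  | b :: rest =>
      let chunk := (b :: rest).take 7
      msbsAux 0 0 chunk :: (chunk.map (fun byte => PySem.Int.band byte 127) ++ goA (rest.drop 6))
  termination_by data => data.length
  decreasing_by simp [List.length_drop]

def escapeSysex (data_8bit : List Int) : List Int := goA data_8bit

-- ===== PORT B =====
-- the 'for i, byte in enumerate(data_8bit)' loop of Source B, carrying (output, msb_pos);
-- msb_pos is always in range by construction, so getD/set are exact for output[msb_pos]
def goB (i : Nat) (out : List Int) (msb : Nat) : List Int → List Int
  | [] => out
  | byte :: rest =>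
      let p := if i % 7 = 0 then (out ++ [(0 : Int)], out.length) else (out, msb)
      let out1 := p.1 ++ [PySem.Int.band byte 127]
      let out2 := if PySem.Int.band byte 128 ≠ 0 then
          out1.set p.2 (PySem.Int.bor (out1.getD p.2 0) ((1 : Int) <<< (i % 7)))
        else out1
      goB (i + 1) out2 p.2 rest

def escapeSysex_alt (data_8bit : List Int) : List Int := goB 0 [] 0 data_8bit

-- ===== PRECONDITION & SPEC =====
def Spec_escapeSysex (data_8bit : List Int) (out : List Int) : Prop := out = escapeSysex_alt data_8bit
instance (data_8bit : List Int) (out : List Int) : Decidable (Spec_escapeSysex data_8bit out) := by unfold Spec_escapeSysex; infer_instance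

-- ===== CLAIM (what is proved, stated in full; the proofs are below) =====
def Claim_equal_escapeSysex : Prop := ∀ (data_8bit : List Int), Dom_escapeSysex data_8bit → Spec_escapeSysex data_8bit (escapeSysex data_8bit)

-- ===== LEMMAS AND PROOFS =====

theorem goA_nil : goA [] = [] := by rw [goA.eq_def]

-- reading/writing the placeholder slot at position pre.length
theorem getD_at (pre : List Int) (m : Int) (t : List Int) :
    (pre ++ m :: t).getD pre.length 0 = m := by
  simp

theorem set_at (pre : List Int) (m x : Int) (t : List Int) :
    (pre ++ m :: t).set pre.length x = pre ++ x :: t := by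
  simp [List.set_append_right]

-- invariants of B's streaming loop:
-- P1: at a chunk start (i % 7 = 0) the loop just emits A's blocks after 'out';
-- P2: mid-chunk, out = pre ++ [m] ++ lows with msb = pre.length and i % 7 = lows.length.
def P1 (data : List Int) : Prop :=
  ∀ (i : Nat) (out : List Int) (msb : Nat), i % 7 = 0 → goB i out msb data = out ++ goA data

def P2 (cs : List Int) : Prop :=
  ∀ (i : Nat) (pre : List Int) (m : Int) (lows : List Int), i % 7 = lows.length → lows.length ≠ 0 →
    goB i (pre ++ m :: lows) pre.length cs =
      pre ++ msbsAux (i % 7) m (cs.take (7 - i % 7)) ::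
        (lows ++ (cs.take (7 - i % 7)).map (fun byte => PySem.Int.band byte 127) ++ goA (cs.drop (7 - i % 7)))

theorem main_invariant : ∀ (n : Nat) (data : List Int), data.length ≤ n → P1 data ∧ P2 data := by
  intro n
  induction n with
  | zero =>
    intro data hlen
    have hd : data = [] := by cases data <;> simp_all
    subst hd
    constructor
    · intro i out msb _; rw [goB, goA_nil]; simp
    · intro i pre m lows _ _; rw [goB]; simp [goA_nil, msbsAux]
  | succ n ih =>
    intro data hlen
    cases data with
    | nil =>
      constructor
      · intro i out msb _; rw [goB, goA_nil]; simp
      · intro i pre m lows _ _; rw [goB]; simp [goA_nil, msbsAux]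
    | cons b rest =>
      have hrest : rest.length ≤ n := by simpa using hlen
      constructor
      · -- P1 at chunk start
        intro i out msb h0
        rw [goB]
        simp only [h0, reduceIte]
        rw [show out ++ [(0 : Int)] ++ [PySem.Int.band b 127] = out ++ (0 : Int) :: [PySem.Int.band b 127] by simp]
        rw [getD_at, set_at]
        by_cases hb : PySem.Int.band b 128 ≠ 0
        · rw [if_pos hb]
          have := (ih rest hrest).2 (i + 1) out (PySem.Int.bor 0 ((1 : Int) <<< 0)) [PySem.Int.band b 127]
            (by simp; omega) (by simp)
          refine this.trans ?_
          have h1 : (i + 1) % 7 = 1 := by omega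
          rw [goA]
          simp [h1, msbsAux, hb, List.take_succ_cons]
          congr 1
        · rw [if_neg hb]
          have := (ih rest hrest).2 (i + 1) out 0 [PySem.Int.band b 127] (by simp; omega) (by simp)
          refine this.trans ?_
          have h1 : (i + 1) % 7 = 1 := by omega
          rw [goA]
          simp [h1, msbsAux, hb, List.take_succ_cons]
      · -- P2 mid-chunk
        intro i pre m lows hj hne
        have hj7 : i % 7 < 7 := Nat.mod_lt _ (by omega)
        have h0 : ¬ i % 7 = 0 := by omega
        rw [goB]
        simp only [if_neg h0]
        rw [show (pre ++ m :: lows) ++ [PySem.Int.band b 127] = pre ++ m :: (lows ++ [PySem.Int.band b 127]) by simp]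
        rw [getD_at, set_at]
        set m' := if PySem.Int.band b 128 ≠ 0 then PySem.Int.bor m ((1 : Int) <<< (i % 7)) else m with hm'
        have hstep : goB (i+1) (pre ++ m' :: (lows ++ [PySem.Int.band b 127])) pre.length rest =
            pre ++ msbsAux (i % 7) m ((b :: rest).take (7 - i % 7)) ::
              (lows ++ ((b :: rest).take (7 - i % 7)).map (fun byte => PySem.Int.band byte 127) ++
                goA ((b :: rest).drop (7 - i % 7))) := by
          by_cases h6 : i % 7 = 6
          · -- last element of the chunk: next index starts a new chunk
            have h1 : (i + 1) % 7 = 0 := by omega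
            rw [(ih rest hrest).1 (i + 1) _ pre.length h1]
            rw [show 7 - i % 7 = 1 by omega]
            simp [msbsAux, hm', h6]
          · have h1 : (i + 1) % 7 = lows.length + 1 := by omega
            rw [(ih rest hrest).2 (i + 1) pre m' (lows ++ [PySem.Int.band b 127]) (by simp [h1]) (by simp)]
            have htk : 7 - i % 7 = (7 - (i + 1) % 7) + 1 := by omega
            rw [htk]
            simp only [List.take_succ_cons, List.drop_succ_cons, List.map_cons]
            rw [show msbsAux (i % 7) m (b :: rest.take (7 - (i+1) % 7)) =
                  msbsAux (i % 7 + 1) m' (rest.take (7 - (i+1) % 7)) by simp [msbsAux, hm']]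
            have h2 : (i + 1) % 7 = i % 7 + 1 := by omega
            rw [h2]
            simp
        by_cases hb : PySem.Int.band b 128 ≠ 0
        · rw [if_pos hb] at *
          simpa [hm', hb] using hstep
        · rw [if_neg hb] at *
          simpa [hm', hb] using hstep

-- ===== VERDICT (by name: the statement is the Claim_ definition above) =====
theorem escapeSysex_spec : Claim_equal_escapeSysex := by
  intro data _
  unfold Spec_escapeSysex escapeSysex escapeSysex_alt
  rw [(main_invariant data.length data le_rfl).1 0 [] 0 (by omega)]
  simp
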